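-- pv_equiv track=rewrite | github.com/SungHwanYun/Coding-Test-in-One-Volume-with-Python-book- | 2-3-2.py | solution
-- ===== SOURCE A (Python) =====
-- def solution(S):
--     d = {}
--     for s in S.split():
--         if s in d:
--             d[s] += 1
--         else:
--             d[s] = 1
--
--     ret = list(d.items())
--     ret.sort(key = lambda x: x[0])
--     return ret
-- ===== SOURCE B (Python) =====
-- def solution(S):
--     ret = []
--     for w in sorted(S.split()):
--         if ret and ret[-1][0] == w:
--             ret[-1] = (w, ret[-1][1] + 1)
--         else:
--             ret.append((w, 1))
--     return ret
-- ===== Notes on version B (the rewrite author's own statement) =====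
-- stated objective: alternative
-- what changed: Instead of counting words in a dict and then sorting the items, B sorts the word list first and makes one pass that groups consecutive runs of equal words into (word, count) pairs.
import Mathlib
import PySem

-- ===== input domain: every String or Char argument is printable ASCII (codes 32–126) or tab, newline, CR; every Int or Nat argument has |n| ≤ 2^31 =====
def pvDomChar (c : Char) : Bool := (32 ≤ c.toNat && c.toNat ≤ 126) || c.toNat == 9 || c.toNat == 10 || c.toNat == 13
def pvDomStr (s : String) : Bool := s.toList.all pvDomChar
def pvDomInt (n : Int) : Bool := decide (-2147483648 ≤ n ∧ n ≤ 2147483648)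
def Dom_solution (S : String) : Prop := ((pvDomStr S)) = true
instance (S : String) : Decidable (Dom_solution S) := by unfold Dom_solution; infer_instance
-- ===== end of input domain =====

-- B sorts the word list first and groups consecutive runs of equal words in one pass, instead of counting in a dict and then sorting the items; same return value.

-- ===== PORT A =====
def solution (S : String) : List (String × Int) :=
  let d := (PySem.Str.split₀ S).foldl
    (fun d s => if d.contains s then d.insert s (d.getD s 0 + 1) else d.insert s 1)
    PySem.Dict.empty
  PySem.List.sorted d.items (fun x => x.1) false

-- ===== PORT B =====
-- B's loop body: 'if ret and ret[-1][0] == w: ret[-1] = (w, ret[-1][1] + 1) else: ret.append((w, 1))'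
def groupStep (ret : List (String × Int)) (w : String) : List (String × Int) :=
  match ret.getLast? with
  | some p => if p.1 = w then ret.dropLast ++ [(w, p.2 + 1)] else ret ++ [(w, 1)]
  | none => ret ++ [(w, 1)]

def solution_alt (S : String) : List (String × Int) :=
  (PySem.List.sorted (PySem.Str.split₀ S) (fun x => x) false).foldl groupStep []

-- ===== PRECONDITION & SPEC =====
def Spec_solution (S : String) (out : List (String × Int)) : Prop := out = solution_alt S
instance (S : String) (out : List (String × Int)) : Decidable (Spec_solution S out) := by unfold Spec_solution; infer_instance

-- ===== CLAIM (what is proved, stated in full; the proofs are below) =====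
def Claim_equal_solution : Prop := ∀ (S : String), Dom_solution S → Spec_solution S (solution S)

-- ===== LEMMAS AND PROOFS =====

-- proof-only helper: run-grouping of a list, as a recursion
def pvGrp : List String → List (String × Int)
  | [] => []
  | w :: rest =>
      (w, 1 + ((rest.takeWhile (fun x => x == w)).length : Int)) ::
        pvGrp (rest.dropWhile (fun x => x == w))
  termination_by l => l.length
  decreasing_by
    have := List.length_dropWhile_le (fun x => x == w) rest
    simp; omega

-- every element of dropWhile (== w) of a sorted list is > w
lemma lt_of_mem_dropWhile (w : String) (rest : List String)
    (h : (w :: rest).Pairwise (· ≤ ·)) :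
    ∀ x ∈ rest.dropWhile (fun x => x == w), w < x := by
  induction rest with
  | nil => simp [List.dropWhile]
  | cons y t ih =>
    intro x hx
    obtain ⟨hw, ht⟩ := List.pairwise_cons.mp h
    obtain ⟨hy, htt⟩ := List.pairwise_cons.mp ht
    rw [List.dropWhile_cons] at hx
    by_cases hyw : y = w
    · simp only [hyw, beq_self_eq_true, if_true] at hx
      exact ih (List.pairwise_cons.mpr ⟨fun a ha => hw a (List.mem_cons_of_mem _ ha), htt⟩) x hx
    · have hb : (y == w) = false := by simp [hyw]
      simp only [hb] at hx
      have hwy : w < y := lt_of_le_of_ne (hw y (List.mem_cons_self)) (Ne.symm hyw)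
      rcases List.mem_cons.mp hx with rfl | hxt
      · exact hwy
      · exact lt_of_lt_of_le hwy (hy x hxt)

-- pvGrp of a sorted list is the canonical sorted (key, count) list
lemma pvGrp_eq (l : List String) (h : l.Pairwise (· ≤ ·)) :
    pvGrp l = (PySem.List.sorted (PySem.Set.ofList l) (fun x => x) false).map
      (fun k => (k, (l.count k : Int))) := by
  induction l using pvGrp.induct with
  | case1 => simp [pvGrp, PySem.Set.ofList, PySem.List.sorted]
  | case2 w rest ih =>
    have hrun : ∀ x ∈ rest.takeWhile (fun x => x == w), x = w :=
      fun x hx => eq_of_beq (List.mem_takeWhile_imp (p := fun x => x == w) hx)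
    have hlt := lt_of_mem_dropWhile w rest h
    have hnotmem : w ∉ rest.dropWhile (fun x => x == w) :=
      fun hm => lt_irrefl w (hlt w hm)
    have hsplit : rest.takeWhile (fun x => x == w) ++ rest.dropWhile (fun x => x == w) = rest :=
      List.takeWhile_append_dropWhile
    have h' : (rest.dropWhile (fun x => x == w)).Pairwise (· ≤ ·) :=
      List.Pairwise.sublist (List.dropWhile_sublist _) h.of_cons
    have hmem' : ∀ a, a ∈ w :: rest ↔ a = w ∨ a ∈ rest.dropWhile (fun x => x == w) := by
      intro a
      constructor
      · intro ha
        rcases List.mem_cons.mp ha with rfl | ha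
        · exact Or.inl rfl
        · rw [← hsplit] at ha
          rcases List.mem_append.mp ha with h1 | h2
          · exact Or.inl (hrun a h1)
          · exact Or.inr h2
      · rintro (rfl | h2)
        · exact List.mem_cons_self
        · exact List.mem_cons_of_mem _ ((List.dropWhile_sublist _).mem h2)
    have hkey : PySem.List.sorted (PySem.Set.ofList (w :: rest)) (fun x => x) false
        = w :: PySem.List.sorted (PySem.Set.ofList (rest.dropWhile (fun x => x == w))) (fun x => x) false := by
      apply PySem.List.sorted_eq_of_perm_of_pairwise_lt
      · apply (List.perm_ext_iff_of_nodup ?_ (PySem.Set.nodup_ofList _)).mpr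
        · intro a
          rw [PySem.Set.mem_ofList]
          rw [List.mem_cons, PySem.List.mem_sorted, PySem.Set.mem_ofList]
          exact (hmem' a).symm
        · refine List.nodup_cons.mpr ⟨?_, ?_⟩
          · rw [PySem.List.mem_sorted, PySem.Set.mem_ofList]
            exact hnotmem
          · exact ((PySem.List.sorted_perm _ _ _).nodup_iff).mpr (PySem.Set.nodup_ofList _)
      · refine List.pairwise_cons.mpr ⟨?_, PySem.List.sorted_ofList_pairwise_lt _⟩
        intro a ha
        rw [PySem.List.mem_sorted, PySem.Set.mem_ofList] at ha
        exact hlt a ha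
    have hcw : ((w :: rest).count w : Int) = 1 + ((rest.takeWhile (fun x => x == w)).length : Int) := by
      have h1 : (rest.takeWhile (fun x => x == w)).count w = (rest.takeWhile (fun x => x == w)).length :=
        List.count_eq_length.mpr (fun b hb => (hrun b hb).symm)
      have h2 : (rest.dropWhile (fun x => x == w)).count w = 0 := List.count_eq_zero.mpr hnotmem
      have h3 : rest.count w = (rest.takeWhile (fun x => x == w)).length := by
        conv_lhs => rw [← hsplit]
        rw [List.count_append, h1, h2]
        omega
      rw [List.count_cons_self, h3]
      push_cast
      omega
    rw [show pvGrp (w :: rest)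
        = (w, 1 + ((rest.takeWhile (fun x => x == w)).length : Int)) ::
            pvGrp (rest.dropWhile (fun x => x == w)) from by rw [pvGrp]]
    rw [hkey, List.map_cons, ih h', ← hcw]
    congr 1
    apply List.map_congr_left
    intro k hk
    rw [PySem.List.mem_sorted, PySem.Set.mem_ofList] at hk
    have hkw : k ≠ w := fun he => lt_irrefl w (he ▸ hlt k hk)
    have hc1 : (w :: rest).count k = rest.count k := by
      rw [List.count_cons_of_ne hkw.symm]
    have hc2 : (rest.takeWhile (fun x => x == w)).count k = 0 :=
      List.count_eq_zero.mpr (fun hm => hkw (hrun k hm))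
    have : rest.count k = (rest.dropWhile (fun x => x == w)).count k := by
      conv_lhs => rw [← hsplit]
      rw [List.count_append, hc2]
      omega
    rw [hc1, this]

-- B's fold over a run of copies of w just bumps the last count
lemma foldl_groupStep_run (run : List String) (w : String) :
    ∀ (c : Int) (acc : List (String × Int)), (∀ x ∈ run, x = w) →
      run.foldl groupStep (acc ++ [(w, c)]) = acc ++ [(w, c + run.length)] := by
  induction run with
  | nil => intro c acc _; simp
  | cons x t ih =>
    intro c acc hrun
    have hx : x = w := hrun x List.mem_cons_self
    rw [List.foldl_cons]
    have hstep : groupStep (acc ++ [(w, c)]) x = acc ++ [(w, c + 1)] := by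
      rw [hx]
      simp [groupStep]
    rw [hstep, ih (c + 1) acc (fun y hy => hrun y (List.mem_cons_of_mem _ hy))]
    have : c + 1 + (t.length : Int) = c + ((x :: t).length : Int) := by
      push_cast [List.length_cons]; omega
    rw [this]

-- B's fold appends the run-grouping of a sorted list whose elements all exceed acc's last key
lemma foldl_groupStep (l : List String) (h : l.Pairwise (· ≤ ·)) :
    ∀ acc : List (String × Int),
      (∀ p ∈ acc.getLast?, ∀ x ∈ l, p.1 < x) →
      l.foldl groupStep acc = acc ++ pvGrp l := by
  induction l using pvGrp.induct with
  | case1 => intro acc _; simp [pvGrp]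
  | case2 w rest ih =>
    intro acc hacc
    have hrun : ∀ x ∈ rest.takeWhile (fun x => x == w), x = w :=
      fun x hx => eq_of_beq (List.mem_takeWhile_imp (p := fun x => x == w) hx)
    have hlt := lt_of_mem_dropWhile w rest h
    have hsplit : rest.takeWhile (fun x => x == w) ++ rest.dropWhile (fun x => x == w) = rest :=
      List.takeWhile_append_dropWhile
    have h' : (rest.dropWhile (fun x => x == w)).Pairwise (· ≤ ·) :=
      List.Pairwise.sublist (List.dropWhile_sublist _) h.of_cons
    have hstep : groupStep acc w = acc ++ [(w, 1)] := by
      cases hl : acc.getLast? with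
      | none => simp [groupStep, hl]
      | some p =>
        have hpw : p.1 < w := hacc p (by rw [hl]; rfl) w List.mem_cons_self
        simp [groupStep, hl, ne_of_lt hpw]
    rw [List.foldl_cons, hstep]
    conv_lhs => rw [← hsplit]
    rw [List.foldl_append, foldl_groupStep_run _ w 1 acc hrun,
      ih h' (acc ++ [(w, 1 + ((rest.takeWhile (fun x => x == w)).length : Int))])
        (by
          intro p hp x hx
          rw [List.getLast?_concat] at hp
          cases hp
          exact hlt x hx)]
    rw [show pvGrp (w :: rest)
        = (w, 1 + ((rest.takeWhile (fun x => x == w)).length : Int)) ::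
            pvGrp (rest.dropWhile (fun x => x == w)) from by rw [pvGrp]]
    simp

-- the Python fold of A equals the counter
lemma fold_eq_counter (ws : List String) :
    ws.foldl (fun d s => if d.contains s then d.insert s (d.getD s 0 + 1) else d.insert s 1)
      PySem.Dict.empty = PySem.Dict.counter ws := by
  have hf : (fun (d : PySem.Dict String Int) s =>
      if d.contains s then d.insert s (d.getD s 0 + 1) else d.insert s 1)
      = fun d s => d.insert s (d.getD s 0 + 1) := by
    funext d s
    by_cases hc : d.contains s
    · simp [hc]
    · have h0 : d.getD s 0 = 0 := PySem.Dict.getD_of_not_contains d (0:Int) (by simpa using hc)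
      simp [hc, h0]
  rw [hf]
  exact PySem.Dict.foldl_insert_getD_add_one_eq_counter ws

lemma solution_eq (S : String) : solution S = solution_alt S := by
  unfold solution solution_alt
  set ws := PySem.Str.split₀ S with hws
  simp only []
  rw [fold_eq_counter ws, PySem.Dict.items_counter ws]
  have hA : PySem.List.sorted ((PySem.Set.ofList ws).map (fun k => (k, (ws.count k : Int))))
        (fun x => x.1) false
      = (PySem.List.sorted (PySem.Set.ofList ws) (fun x => x) false).map
        (fun k => (k, (ws.count k : Int))) := by
    apply PySem.List.sorted_eq_of_perm_of_pairwise_lt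
    · exact (PySem.List.sorted_perm _ _ _).map _
    · exact List.Pairwise.map _ (fun a b hab => hab) (PySem.List.sorted_ofList_pairwise_lt ws)
  rw [hA]
  have hsorted : (PySem.List.sorted ws (fun x => x) false).Pairwise (· ≤ ·) :=
    PySem.List.sorted_pairwise ws (fun x => x)
  rw [foldl_groupStep _ hsorted [] (by simp)]
  rw [List.nil_append, pvGrp_eq _ hsorted]
  have hperm : (PySem.Set.ofList (PySem.List.sorted ws (fun x => x) false)).Perm
      (PySem.Set.ofList ws) := by
    apply (List.perm_ext_iff_of_nodup (PySem.Set.nodup_ofList _) (PySem.Set.nodup_ofList _)).mpr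
    intro a
    rw [PySem.Set.mem_ofList, PySem.Set.mem_ofList, PySem.List.mem_sorted]
  rw [PySem.List.sorted_eq_sorted_of_perm _ _ _ (fun a b hab => hab) hperm]
  apply List.map_congr_left
  intro k _
  rw [(PySem.List.sorted_perm ws (fun x => x) false).count_eq k]

-- ===== VERDICT (by name: the statement is the Claim_ definition above) =====
theorem solution_spec : Claim_equal_solution := by
  intro S _
  unfold Spec_solution
  exact solution_eq S
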